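/- GENERATED by farm/mkstatement.py from design/units.tsv (unit `digest_map.2`) and the assertions of Gif/Spec/Seg_digest_map.lean — do not edit.
   THE STATEMENT of the proof unit `digest_map.2`: segment 2 of `digest_map` (26 instructions; entries 0x105553;
   exits 0x105553,0x105558; ranges 0x105553-0x105558,0x1054f5-0x105553)
   takes each of its entry assertions to one of its exit assertions (`Gif.Spec.digest_map.Seg2`), given the contracts of its callees.
   What the names mean: ProgX/Base/Spec/Basic.lean (the shared hypotheses), Gif/Spec/Seg_digest_map.lean (the assertions). The theorem to prove:
   `theorem digest_map_2_ok : Gif.Spec.digest_map_2.Statement`. -/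
import Gif.Code
import Gif.Dec.All
import Gif.Labels
import Gif.Spec.Driver
import Gif.Spec.Seg_digest_map
namespace Gif.Spec.digest_map_2
open X86 X86.User Asan

/-- The statement of unit `digest_map.2`. -/
def Statement : Prop :=
  ∀ (Lay : Layout) (_hLay : Lay.hi = 0x1000000) (μ : Microarch) (_hμ : UserX.MicroOK μ) (u₀ : State)
    (_hcode : HasCodeNat Lay u₀ Gif.L.digest_map.entry Gif.Code.code_digest_map.nat Gif.L.digest_map.size)
    (_h_digest_byte : Calls Lay μ ProgX.Base.WayInv (ProgX.Base.conv u₀) Gif.L.digest_byte.entry Gif.Spec.digest_byte.spec)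
    (_h_asan_load8_noabort : Asan.SmallCheck Lay μ ProgX.Base.WayInv (ProgX.Base.CodeOK u₀) [.rax, .rcx, .rdx] 8 ProgX.Base.L.__asan_load8_noabort.entry)
    (_h_asan_load1_noabort : Asan.SmallCheck Lay μ ProgX.Base.WayInv (ProgX.Base.CodeOK u₀) [.rax, .rdx] 1 ProgX.Base.L.__asan_load1_noabort.entry),
    Gif.Spec.digest_map.Seg2 Lay μ u₀

end Gif.Spec.digest_map_2
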